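-- pv_equiv track=rewrite | github.com/AmirTlinov/apply_task | core/desktop/devtools/application/namespace_display.py | build_display_names
-- ===== SOURCE A (Python) =====
-- from dataclasses import dataclass
-- from typing import Dict, Iterable, List, Tuple
--
-- @dataclass(frozen=True)
-- class NamespaceParts:
--     namespace: str
--     repo: str
--     owner: str
--
--     @property
--     def base(self) -> str:
--         return self.repo or self.namespace
--
-- def parse_namespace(namespace: str) -> NamespaceParts:
--     """Parse namespace into repo + owner (best-effort, display-oriented)."""
--     name = (namespace or "").strip()
--     if not name:
--         return NamespaceParts(namespace="", repo="", owner="")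
--
--     raw = name
--     # Legacy namespaces: "__github.com_<owner>_<repo>" or "github.com_<owner>_<repo>"
--     if raw.startswith("__github.com_"):
--         raw = raw[2:]
--     if raw.startswith("github.com_"):
--         raw = raw[len("github.com_") :].strip("_").strip()
--
--     if raw and "_" in raw and not raw.startswith("_"):
--         owner, repo = raw.split("_", 1)
--         if owner and repo:
--             return NamespaceParts(namespace=name, repo=repo, owner=owner)
--
--     return NamespaceParts(namespace=name, repo=raw or name, owner="")
--
-- def build_display_names(namespaces: Iterable[str]) -> Dict[str, str]:
--     """Return mapping {namespace: display_name} with collision-safe qualifiers."""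
--     parts: List[NamespaceParts] = [parse_namespace(ns) for ns in namespaces]
--     counts: Dict[str, int] = {}
--     for p in parts:
--         key = (p.base or p.namespace).lower()
--         counts[key] = counts.get(key, 0) + 1
--
--     display: Dict[str, str] = {}
--     for p in parts:
--         base = p.base or p.namespace
--         key = base.lower()
--         if counts.get(key, 0) <= 1:
--             display[p.namespace] = base
--             continue
--         qualifier = p.owner or "local"
--         display[p.namespace] = f"{base} ({qualifier})"
--     return display
-- ===== SOURCE B (Python) =====
-- # One-pass re-implementation: instead of counting keys first and re-scanning all
-- # parts, keep per-key state while scanning once; on the second occurrence of a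
-- # key, retroactively qualify the first entry (dict overwrite keeps its position).
-- from dataclasses import dataclass
--
--
-- @dataclass(frozen=True)
-- class NamespaceParts:
--     namespace: str
--     repo: str
--     owner: str
--
--     @property
--     def base(self) -> str:
--         return self.repo or self.namespace
--
--
-- def parse_namespace(namespace: str) -> NamespaceParts:
--     name = (namespace or "").strip()
--     if not name:
--         return NamespaceParts(namespace="", repo="", owner="")
--
--     raw = name
--     if raw.startswith("__github.com_"):
--         raw = raw[2:]
--     if raw.startswith("github.com_"):
--         raw = raw[len("github.com_") :].strip("_").strip()
--
--     if raw and "_" in raw and not raw.startswith("_"):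
--         owner, repo = raw.split("_", 1)
--         if owner and repo:
--             return NamespaceParts(namespace=name, repo=repo, owner=owner)
--
--     return NamespaceParts(namespace=name, repo=raw or name, owner="")
--
--
-- def _qualified(p: NamespaceParts) -> str:
--     base = p.base or p.namespace
--     return f"{base} ({p.owner or 'local'})"
--
--
-- def build_display_names(namespaces):
--     display = {}
--     # first[key] = the sole NamespaceParts seen with this key, or None once the
--     # key is known to collide (all its entries already qualified).
--     first = {}
--     for ns in namespaces:
--         p = parse_namespace(ns)
--         base = p.base or p.namespace
--         key = base.lower()
--         if key not in first:
--             first[key] = p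
--             display[p.namespace] = base
--         else:
--             prev = first[key]
--             if prev is not None:
--                 display[prev.namespace] = _qualified(prev)
--                 first[key] = None
--             display[p.namespace] = _qualified(p)
--     return display
-- ===== Notes on version B (the rewrite author's own statement) =====
-- stated objective: alternative
-- what changed: Replaces A's two passes (build a key-count dict, then re-scan all parts testing the count) by a single pass that keeps per-key state and, on the second occurrence of a key, retroactively overwrites the first entry with its qualified form (dict overwrite keeps its position).
import Mathlib
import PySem

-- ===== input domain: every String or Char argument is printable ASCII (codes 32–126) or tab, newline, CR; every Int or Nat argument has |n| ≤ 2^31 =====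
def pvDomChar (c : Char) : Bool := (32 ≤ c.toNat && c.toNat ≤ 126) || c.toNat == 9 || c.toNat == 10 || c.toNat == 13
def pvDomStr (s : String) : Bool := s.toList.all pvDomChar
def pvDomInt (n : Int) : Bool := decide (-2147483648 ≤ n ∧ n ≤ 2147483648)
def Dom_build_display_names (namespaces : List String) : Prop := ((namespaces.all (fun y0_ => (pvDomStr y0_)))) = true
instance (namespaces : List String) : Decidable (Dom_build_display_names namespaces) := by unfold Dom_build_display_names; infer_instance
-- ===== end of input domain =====

-- B replaces A's count-then-rescan two-pass construction by a single pass with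
-- per-key state and retroactive qualification of the first colliding entry
-- (objective: alternative decomposition, same asymptotic cost).

-- ===== PORT A =====
-- shared helper: parse_namespace (the same module helper in Source A and Source B);
-- result is (namespace, repo, owner); body after 'name = (namespace or "").strip()'
def pvParseName (name : String) : String × String × String :=
  if name == "" then ("", "", "")
  else
    let raw := name
    let raw := if PySem.Str.startswith raw "__github.com_" then PySem.Str.slice raw (some 2) none else raw
    let raw := if PySem.Str.startswith raw "github.com_" then
        PySem.Str.strip (PySem.Str.stripChars (PySem.Str.slice raw (some 11) none) "_")
      else raw
    if raw != "" && PySem.Str.isIn "_" raw && !(PySem.Str.startswith raw "_") then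
      match PySem.Str.splitMax? raw "_" 1 with
      | some (owner :: repo :: _) =>
          if owner != "" && repo != "" then (name, repo, owner)
          else (name, if raw == "" then name else raw, "")
      | _ => (name, if raw == "" then name else raw, "")
    else (name, if raw == "" then name else raw, "")

def pvParse (ns : String) : String × String × String := pvParseName (PySem.Str.strip ns)

-- p.base or p.namespace  (NamespaceParts.base is the property 'repo or namespace')
def pvBaseOr (p : String × String × String) : String :=
  let b := if p.2.1 == "" then p.1 else p.2.1   -- p.base
  if b == "" then p.1 else b

def build_display_names (namespaces : List String) : List (String × String) :=
  let parts := namespaces.map pvParse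
  let counts : PySem.Dict String Int := parts.foldl (fun d p =>
    let key := PySem.Str.lower (pvBaseOr p)
    d.insert key (d.getD key 0 + 1)) PySem.Dict.empty
  let display : PySem.Dict String String := parts.foldl (fun d p =>
    let base := pvBaseOr p
    let key := PySem.Str.lower base
    if counts.getD key 0 ≤ 1 then d.insert p.1 base
    else
      let qualifier := if p.2.2 == "" then "local" else p.2.2
      d.insert p.1 (base ++ " (" ++ qualifier ++ ")")) PySem.Dict.empty
  display.items

-- ===== PORT B =====
-- helper _qualified of Source B
def pvQual (p : String × String × String) : String :=
  let base := pvBaseOr p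
  base ++ " (" ++ (if p.2.2 == "" then "local" else p.2.2) ++ ")"

-- the body of Source B's single loop; state = (display, first)
def pvStepB (st : PySem.Dict String String × PySem.Dict String (Option (String × String × String)))
    (ns : String) :
    PySem.Dict String String × PySem.Dict String (Option (String × String × String)) :=
  let p := pvParse ns
  let base := pvBaseOr p
  let key := PySem.Str.lower base
  if st.2.contains key = false then
    (st.1.insert p.1 base, st.2.insert key (some p))
  else
    match st.2.get? key with
    | none => st            -- unreachable: the branch guarantees key ∈ first
    | some prev =>
      match prev with
      | some q => ((st.1.insert q.1 (pvQual q)).insert p.1 (pvQual p), st.2.insert key none)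
      | none => (st.1.insert p.1 (pvQual p), st.2)

def build_display_names_alt (namespaces : List String) : List (String × String) :=
  (namespaces.foldl pvStepB (PySem.Dict.empty, PySem.Dict.empty)).1.items

-- ===== PRECONDITION & SPEC =====
def Spec_build_display_names (namespaces : List String) (out : List (String × String)) : Prop := out = build_display_names_alt namespaces
instance (namespaces : List String) (out : List (String × String)) : Decidable (Spec_build_display_names namespaces out) := by unfold Spec_build_display_names; infer_instance

-- ===== CLAIM (what is proved, stated in full; the proofs are below) =====
def Claim_equal_build_display_names : Prop := ∀ (namespaces : List String), Dom_build_display_names namespaces → Spec_build_display_names namespaces (build_display_names namespaces)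

-- ===== LEMMAS AND PROOFS =====

lemma pvParseName_fst_aux (name raw : String) :
    (if (raw != "" && PySem.Str.isIn "_" raw && !(PySem.Str.startswith raw "_")) = true then
      match PySem.Str.splitMax? raw "_" 1 with
      | some (owner :: repo :: _) =>
          if owner != "" && repo != "" then (name, repo, owner)
          else (name, if raw == "" then name else raw, "")
      | _ => (name, if raw == "" then name else raw, "")
    else (name, if raw == "" then name else raw, "")).1 = name := by
  split
  · split <;> split <;> rfl
  · rfl

lemma pvParseName_fst (name : String) : (pvParseName name).1 = name := by
  unfold pvParseName
  split
  · next h => simp at h; simp [h]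
  · exact pvParseName_fst_aux name _

lemma pvParse_eq_of_fst_eq {a b : String} (h : (pvParse a).1 = (pvParse b).1) :
    pvParse a = pvParse b := by
  unfold pvParse at *
  rw [pvParseName_fst, pvParseName_fst] at h
  rw [h]
def pvKF (ns : String) : String := PySem.Str.lower (pvBaseOr (pvParse ns))
def pvCnt (l : List String) (k : String) : Nat := (l.map pvKF).count k
def pvCanon (v : String → String) (l : List String) (d : PySem.Dict String String) :
    PySem.Dict String String :=
  l.foldl (fun d ns => d.insert (pvParse ns).1 (v ns)) d
lemma pvCnt_append_singleton (l : List String) (ns k : String) :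
    pvCnt (l ++ [ns]) k = pvCnt l k + (if pvKF ns = k then 1 else 0) := by
  simp [pvCnt, List.count_append, List.count_singleton]

lemma pvCanon_congr (v w : String → String) (l : List String)
    (d : PySem.Dict String String) (h : ∀ x ∈ l, v x = w x) :
    pvCanon v l d = pvCanon w l d := by
  induction l generalizing d with
  | nil => rfl
  | cons x xs ih =>
      simp only [pvCanon, List.foldl_cons] at *
      rw [h x (List.mem_cons_self)]
      exact ih _ (fun y hy => h y (List.mem_cons_of_mem _ hy))

lemma pvInsert_insert_comm_of_contains {ν : Type} (d : PySem.Dict String ν) (k x : String)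
    (u w : ν) (hne : x ≠ k) (hc : d.contains k = true) :
    (d.insert x w).insert k u = (d.insert k u).insert x w := by
  apply PySem.Dict.ext
  have hck : (d.insert x w).contains k = true := by
    rw [PySem.Dict.contains_insert]; simp [hc]
  have hcx : (d.insert k u).contains x = d.contains x := by
    rw [PySem.Dict.contains_insert]; simp [hne]
  by_cases hx : d.contains x = true
  · rw [PySem.Dict.items_insert_of_contains _ u hck,
        PySem.Dict.items_insert_of_contains _ w hx,
        PySem.Dict.items_insert_of_contains _ w (by rw [hcx]; exact hx),
        PySem.Dict.items_insert_of_contains _ u hc]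
    simp only [List.map_map]
    apply List.map_congr_left
    intro p _
    by_cases h1 : p.1 = x <;> by_cases h2 : p.1 = k <;>
      simp_all [Function.comp, Ne.symm hne]
  · have hx' : d.contains x = false := by simpa using hx
    rw [PySem.Dict.items_insert_of_contains _ u hck,
        PySem.Dict.items_insert_of_not_contains _ w hx',
        PySem.Dict.items_insert_of_not_contains _ w (by rw [hcx]; exact hx'),
        PySem.Dict.items_insert_of_contains _ u hc]
    simp [hne]

lemma pvCanon_insert_comm (v : String → String) (l : List String) (k : String) (u : String)
    (d : PySem.Dict String String) (hk : ∀ x ∈ l, (pvParse x).1 ≠ k) (hc : d.contains k = true) :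
    pvCanon v l (d.insert k u) = (pvCanon v l d).insert k u := by
  induction l generalizing d with
  | nil => rfl
  | cons x xs ih =>
      simp only [pvCanon, List.foldl_cons] at *
      rw [← pvInsert_insert_comm_of_contains d k (pvParse x).1 u (v x)
            (hk x List.mem_cons_self) hc]
      exact ih _ (fun y hy => hk y (List.mem_cons_of_mem _ hy))
        (by rw [PySem.Dict.contains_insert]; simp [hc])

lemma pvCanon_update_one (v w : String → String) (l : List String) (ns0 : String)
    (d : PySem.Dict String String) (hcount : l.count ns0 = 1)
    (h : ∀ x ∈ l, x ≠ ns0 → (pvParse x).1 ≠ (pvParse ns0).1 ∧ v x = w x) :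
    pvCanon w l d = (pvCanon v l d).insert (pvParse ns0).1 (w ns0) := by
  induction l generalizing d with
  | nil => simp at hcount
  | cons x xs ih =>
      by_cases hx : x = ns0
      · subst hx
        have hxs : x ∉ xs := by
          intro hmem
          have := List.one_le_count_iff.mpr hmem
          simp [List.count_cons_self] at hcount
          omega
        have hkeys : ∀ y ∈ xs, (pvParse y).1 ≠ (pvParse x).1 := by
          intro y hy
          have hyne : y ≠ x := fun e => hxs (e ▸ hy)
          exact (h y (List.mem_cons_of_mem _ hy) hyne).1
        simp only [pvCanon, List.foldl_cons]
        calc xs.foldl (fun d ns => d.insert (pvParse ns).1 (w ns)) (d.insert (pvParse x).1 (w x))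
            = xs.foldl (fun d ns => d.insert (pvParse ns).1 (v ns)) (d.insert (pvParse x).1 (w x)) := by
              apply pvCanon_congr
              intro y hy
              have hyne : y ≠ x := fun e => hxs (e ▸ hy)
              exact ((h y (List.mem_cons_of_mem _ hy) hyne).2).symm
          _ = xs.foldl (fun d ns => d.insert (pvParse ns).1 (v ns)) ((d.insert (pvParse x).1 (v x)).insert (pvParse x).1 (w x)) := by
              rw [PySem.Dict.insert_insert_self]
          _ = (xs.foldl (fun d ns => d.insert (pvParse ns).1 (v ns)) (d.insert (pvParse x).1 (v x))).insert (pvParse x).1 (w x) := by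
              exact pvCanon_insert_comm v xs _ _ _ hkeys
                (by rw [PySem.Dict.contains_insert]; simp)
      · have hcx : xs.count ns0 = 1 := by
          rw [List.count_cons] at hcount
          simpa [hx] using hcount
        simp only [pvCanon, List.foldl_cons]
        rw [(h x List.mem_cons_self hx).2]
        exact ih _ hcx (fun y hy => h y (List.mem_cons_of_mem _ hy))
def pvVF (l : List String) (ns : String) : String :=
  if pvCnt l (pvKF ns) ≤ 1 then pvBaseOr (pvParse ns) else pvQual (pvParse ns)
def pvInv (pre : List String) : Prop :=
  (pre.foldl pvStepB (PySem.Dict.empty, PySem.Dict.empty)).1 = pvCanon (pvVF pre) pre PySem.Dict.empty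
  ∧ ∀ k,
      (pvCnt pre k = 0 → (pre.foldl pvStepB (PySem.Dict.empty, PySem.Dict.empty)).2.get? k = none)
    ∧ (pvCnt pre k = 1 → ∃ ns0, pre.filter (fun x => pvKF x == k) = [ns0] ∧
        (pre.foldl pvStepB (PySem.Dict.empty, PySem.Dict.empty)).2.get? k = some (some (pvParse ns0)))
    ∧ (2 ≤ pvCnt pre k → (pre.foldl pvStepB (PySem.Dict.empty, PySem.Dict.empty)).2.get? k = some none)

-- elementwise facts
lemma pvKF_eq_of_mem_filter {pre : List String} {k ns0 x : String}
    (hf : pre.filter (fun x => pvKF x == k) = [ns0])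
    (hx : x ∈ pre) (hkx : pvKF x = k) : x = ns0 := by
  have : x ∈ pre.filter (fun x => pvKF x == k) := by
    simp [List.mem_filter, hx, hkx]
  rw [hf] at this; simpa using this

lemma pvCount_one_of_filter {pre : List String} {k ns0 : String}
    (hf : pre.filter (fun x => pvKF x == k) = [ns0]) : pre.count ns0 = 1 := by
  have hmem : ns0 ∈ pre := by
    have : ns0 ∈ pre.filter (fun x => pvKF x == k) := by rw [hf]; simp
    exact (List.mem_filter.mp this).1
  have hk0 : pvKF ns0 = k := by
    have : ns0 ∈ pre.filter (fun x => pvKF x == k) := by rw [hf]; simp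
    simpa using (List.mem_filter.mp this).2
  have h1 : pre.count ns0 ≤ pre.countP (fun x => pvKF x == k) := by
    rw [List.count_eq_countP]
    apply List.countP_mono_left
    intro x hx he
    have : x = ns0 := by simpa using he
    subst this; simp [hk0]
  have h2 : pre.countP (fun x => pvKF x == k) = 1 := by
    rw [List.countP_eq_length_filter, hf]; rfl
  have h3 := List.one_le_count_iff.mpr hmem
  omega

lemma pvStepB_eq (st : PySem.Dict String String × PySem.Dict String (Option (String × String × String))) (ns : String) :
    pvStepB st ns =
      if st.2.contains (pvKF ns) = false then
        (st.1.insert (pvParse ns).1 (pvBaseOr (pvParse ns)), st.2.insert (pvKF ns) (some (pvParse ns)))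
      else
        match st.2.get? (pvKF ns) with
        | none => st
        | some prev =>
          match prev with
          | some q => ((st.1.insert q.1 (pvQual q)).insert (pvParse ns).1 (pvQual (pvParse ns)), st.2.insert (pvKF ns) none)
          | none => (st.1.insert (pvParse ns).1 (pvQual (pvParse ns)), st.2) := by
  unfold pvStepB pvKF; rfl

lemma pvCanon_append_singleton (v : String → String) (l : List String) (x : String)
    (d : PySem.Dict String String) :
    pvCanon v (l ++ [x]) d = (pvCanon v l d).insert (pvParse x).1 (v x) := by
  simp [pvCanon, List.foldl_append]

lemma pvCnt_pos_of_mem {l : List String} {x : String} (hx : x ∈ l) {k : String}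
    (hk : pvKF x = k) : 1 ≤ pvCnt l k := by
  apply List.one_le_count_iff.mpr
  exact hk ▸ List.mem_map_of_mem hx

lemma pvCnt_eq_countP (l : List String) (k : String) :
    pvCnt l k = l.countP (fun x => pvKF x == k) := by
  rw [pvCnt, List.count_eq_countP, List.countP_map]; rfl

lemma pvFilter_eq_nil_of_cnt_zero {l : List String} {k : String} (h : pvCnt l k = 0) :
    l.filter (fun x => pvKF x == k) = [] := by
  rw [← List.length_eq_zero_iff, ← List.countP_eq_length_filter, ← pvCnt_eq_countP]
  exact h

lemma pvVF_append_of_ne {pre : List String} {ns x : String} (h : pvKF ns ≠ pvKF x) :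
    pvVF (pre ++ [ns]) x = pvVF pre x := by
  unfold pvVF
  rw [pvCnt_append_singleton, if_neg h, Nat.add_zero]

lemma pvInv_holds (pre : List String) : pvInv pre := by
  induction pre using List.reverseRecOn with
  | nil =>
      refine ⟨rfl, fun k => ⟨fun _ => rfl, fun h => by simp [pvCnt] at h, fun h => by simp [pvCnt] at h⟩⟩
  | append_singleton pre ns ih =>
      obtain ⟨hd, hf⟩ := ih
      unfold pvInv
      set S := pre.foldl pvStepB ((PySem.Dict.empty : PySem.Dict String String), (PySem.Dict.empty : PySem.Dict String (Option (String × String × String)))) with hS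
      have hfold : (pre ++ [ns]).foldl pvStepB (PySem.Dict.empty, PySem.Dict.empty) = pvStepB S ns := by
        rw [List.foldl_append]; rfl
      have hcntk : ∀ k, pvCnt (pre ++ [ns]) k = pvCnt pre k + (if pvKF ns = k then 1 else 0) :=
        fun k => pvCnt_append_singleton pre ns k
      have hfilk : ∀ k, pvKF ns ≠ k → (pre ++ [ns]).filter (fun x => pvKF x == k) = pre.filter (fun x => pvKF x == k) := by
        intro k hk; rw [List.filter_append]; simp [hk]
      rcases hcase : pvCnt pre (pvKF ns) with _ | n
      · -- first occurrence of this key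
        have hS2 : S.2.get? (pvKF ns) = none := (hf (pvKF ns)).1 hcase
        have hco : S.2.contains (pvKF ns) = false := by
          rw [PySem.Dict.contains_eq_isSome_get?, hS2]; rfl
        have hstep : pvStepB S ns = (S.1.insert (pvParse ns).1 (pvBaseOr (pvParse ns)), S.2.insert (pvKF ns) (some (pvParse ns))) := by
          rw [pvStepB_eq, hco]; simp
        rw [hfold, hstep]
        constructor
        · -- display
          rw [pvCanon_append_singleton]
          have hv : pvVF (pre ++ [ns]) ns = pvBaseOr (pvParse ns) := by
            unfold pvVF; rw [hcntk, hcase]; simp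
          rw [hv]
          have hpre : pvCanon (pvVF (pre ++ [ns])) pre PySem.Dict.empty = pvCanon (pvVF pre) pre PySem.Dict.empty := by
            apply pvCanon_congr
            intro x hx
            have hne : pvKF ns ≠ pvKF x := by
              intro he
              have := pvCnt_pos_of_mem hx he.symm
              omega
            exact pvVF_append_of_ne hne
          rw [hpre, hd]
        · intro k
          by_cases hk : pvKF ns = k
          · subst hk
            refine ⟨fun h => by rw [hcntk] at h; simp at h, fun _ => ⟨ns, ?_, ?_⟩, fun h => by rw [hcntk, hcase] at h; simp at h⟩
            · rw [List.filter_append, pvFilter_eq_nil_of_cnt_zero hcase]; simp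
            · exact PySem.Dict.get?_insert_self ..
          · have hget : (S.2.insert (pvKF ns) (some (pvParse ns))).get? k = S.2.get? k :=
              PySem.Dict.get?_insert_of_ne _ _ (fun he => hk he.symm)
            have hc' : pvCnt (pre ++ [ns]) k = pvCnt pre k := by rw [hcntk, if_neg hk]; rfl
            refine ⟨fun h => ?_, fun h => ?_, fun h => ?_⟩
            · rw [hget]; exact (hf k).1 (by omega)
            · obtain ⟨ns0, h1, h2⟩ := (hf k).2.1 (by omega)
              exact ⟨ns0, by rw [hfilk k hk]; exact h1, by rw [hget]; exact h2⟩
            · rw [hget]; exact (hf k).2.2 (by omega)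
      rcases n with _ | n
      · -- second occurrence: retroactive qualification
        obtain ⟨ns0, hfil, hget0⟩ := (hf (pvKF ns)).2.1 hcase
        have hk0 : pvKF ns0 = pvKF ns := by
          have : ns0 ∈ pre.filter (fun x => pvKF x == pvKF ns) := by rw [hfil]; simp
          simpa using (List.mem_filter.mp this).2
        have hco : S.2.contains (pvKF ns) = false ↔ False := by
          rw [PySem.Dict.contains_eq_isSome_get?, hget0]; simp
        have hstep : pvStepB S ns = ((S.1.insert (pvParse ns0).1 (pvQual (pvParse ns0))).insert (pvParse ns).1 (pvQual (pvParse ns)), S.2.insert (pvKF ns) none) := by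
          rw [pvStepB_eq]
          rw [if_neg (by rw [PySem.Dict.contains_eq_isSome_get?, hget0]; simp), hget0]
        rw [hfold, hstep]
        constructor
        · rw [pvCanon_append_singleton]
          have hv : pvVF (pre ++ [ns]) ns = pvQual (pvParse ns) := by
            unfold pvVF; rw [hcntk, hcase]; simp
          rw [hv]
          have hupd : pvCanon (pvVF (pre ++ [ns])) pre PySem.Dict.empty =
              (pvCanon (pvVF pre) pre PySem.Dict.empty).insert (pvParse ns0).1 (pvVF (pre ++ [ns]) ns0) := by
            apply pvCanon_update_one
            · exact pvCount_one_of_filter hfil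
            · intro x hx hxne
              have hkx : pvKF x ≠ pvKF ns := by
                intro he
                exact hxne (pvKF_eq_of_mem_filter hfil hx he)
              constructor
              · intro he
                have := pvParse_eq_of_fst_eq he
                have : pvKF x = pvKF ns0 := by unfold pvKF; rw [this]
                exact hkx (this.trans hk0)
              · exact (pvVF_append_of_ne (fun he => hkx he.symm)).symm
          have hv0 : pvVF (pre ++ [ns]) ns0 = pvQual (pvParse ns0) := by
            unfold pvVF; rw [hk0, hcntk, hcase]; simp
          rw [hupd, hv0, hd]
        · intro k
          by_cases hk : pvKF ns = k
          · subst hk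
            refine ⟨fun h => by rw [hcntk, hcase] at h; simp at h, fun h => by rw [hcntk, hcase] at h; simp at h, fun _ => PySem.Dict.get?_insert_self ..⟩
          · have hget : (S.2.insert (pvKF ns) none).get? k = S.2.get? k :=
              PySem.Dict.get?_insert_of_ne _ _ (fun he => hk he.symm)
            have hc' : pvCnt (pre ++ [ns]) k = pvCnt pre k := by rw [hcntk, if_neg hk]; rfl
            refine ⟨fun h => ?_, fun h => ?_, fun h => ?_⟩
            · rw [hget]; exact (hf k).1 (by omega)
            · obtain ⟨ns1, h1, h2⟩ := (hf k).2.1 (by omega)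
              exact ⟨ns1, by rw [hfilk k hk]; exact h1, by rw [hget]; exact h2⟩
            · rw [hget]; exact (hf k).2.2 (by omega)
      · -- key already collided
        have hget0 : S.2.get? (pvKF ns) = some none := (hf (pvKF ns)).2.2 (by omega)
        have hstep : pvStepB S ns = (S.1.insert (pvParse ns).1 (pvQual (pvParse ns)), S.2) := by
          rw [pvStepB_eq]
          rw [if_neg (by rw [PySem.Dict.contains_eq_isSome_get?, hget0]; simp)]
          rw [hget0]
        rw [hfold, hstep]
        constructor
        · rw [pvCanon_append_singleton]
          have hv : pvVF (pre ++ [ns]) ns = pvQual (pvParse ns) := by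
            unfold pvVF; rw [hcntk, hcase]; simp
          rw [hv]
          have hpre : pvCanon (pvVF (pre ++ [ns])) pre PySem.Dict.empty = pvCanon (pvVF pre) pre PySem.Dict.empty := by
            apply pvCanon_congr
            intro x hx
            by_cases hkx : pvKF x = pvKF ns
            · unfold pvVF
              rw [hkx, hcntk, hcase]
              rw [if_neg (by simp), if_neg (by omega)]
            · exact pvVF_append_of_ne (fun he => hkx he.symm)
          rw [hpre, hd]
        · intro k
          by_cases hk : pvKF ns = k
          · subst hk
            refine ⟨fun h => by rw [hcntk, hcase] at h; simp at h, fun h => by rw [hcntk, hcase] at h; simp at h, fun _ => hget0⟩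
          · have hc' : pvCnt (pre ++ [ns]) k = pvCnt pre k := by rw [hcntk, if_neg hk]; rfl
            refine ⟨fun h => ?_, fun h => ?_, fun h => ?_⟩
            · exact (hf k).1 (by omega)
            · obtain ⟨ns1, h1, h2⟩ := (hf k).2.1 (by omega)
              exact ⟨ns1, by rw [hfilk k hk]; exact h1, h2⟩
            · exact (hf k).2.2 (by omega)
lemma pvA_eq_canon (l : List String) :
    build_display_names l = (pvCanon (pvVF l) l PySem.Dict.empty).items := by
  unfold build_display_names
  have hcounts : ∀ k, ((l.map pvParse).foldl (fun d p =>
      let key := PySem.Str.lower (pvBaseOr p)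
      d.insert key (d.getD key 0 + 1)) (PySem.Dict.empty : PySem.Dict String Int)).getD k 0
      = (pvCnt l k : Int) := by
    intro k
    have h1 : (l.map pvParse).foldl (fun d p =>
        let key := PySem.Str.lower (pvBaseOr p)
        d.insert key (d.getD key 0 + 1)) (PySem.Dict.empty : PySem.Dict String Int)
        = (l.map pvKF).foldl (fun d x => d.insert x (d.getD x 0 + 1)) PySem.Dict.empty := by
      rw [List.foldl_map, List.foldl_map]
      rfl
    rw [h1, PySem.Dict.getD_foldl_insert_add_one]
    simp [pvCnt]
  have hfun : (fun (d : PySem.Dict String String) ns =>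
      (fun d p =>
        let base := pvBaseOr p
        let key := PySem.Str.lower base
        if ((l.map pvParse).foldl (fun d p =>
            let key := PySem.Str.lower (pvBaseOr p)
            d.insert key (d.getD key 0 + 1)) (PySem.Dict.empty : PySem.Dict String Int)).getD key 0 ≤ 1 then d.insert p.1 base
        else
          let qualifier := if p.2.2 == "" then "local" else p.2.2
          d.insert p.1 (base ++ " (" ++ qualifier ++ ")")) d (pvParse ns))
      = fun (d : PySem.Dict String String) ns => d.insert (pvParse ns).1 (pvVF l ns) := by
    funext d ns
    show (if ((l.map pvParse).foldl _ PySem.Dict.empty).getD (pvKF ns) 0 ≤ 1 then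
        d.insert (pvParse ns).1 (pvBaseOr (pvParse ns))
      else d.insert (pvParse ns).1 (pvQual (pvParse ns))) = d.insert (pvParse ns).1 (pvVF l ns)
    simp only [hcounts]
    unfold pvVF
    by_cases hc : pvCnt l (pvKF ns) ≤ 1
    · rw [if_pos (by exact_mod_cast hc), if_pos hc]
    · rw [if_neg (by exact_mod_cast hc), if_neg hc]
  show ((l.map pvParse).foldl _ PySem.Dict.empty).items = _
  rw [List.foldl_map, hfun]
  rfl

-- ===== VERDICT (by name: the statement is the Claim_ definition above) =====
theorem build_display_names_spec : Claim_equal_build_display_names := by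
  intro l _
  unfold Spec_build_display_names build_display_names_alt
  rw [pvA_eq_canon, (pvInv_holds l).1]
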